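-- pv_equiv track=rewrite | github.com/nawww83/generator_idz | linear_codes.py | mult_M
-- ===== SOURCE A (Python) =====
-- import operator
-- from functools import reduce
--
-- def check_matrix(M):
--     rows = len(M)
--     assert(rows > 0)
--     nn = len(reduce(operator.iconcat, M, []))
--     cols = nn // rows
--     ok = True
--     for r in range(rows):
--         ok = ok and (len(M[r]) == cols)
--     return (rows, cols, ok)
--
-- def xor1(v):
--     return reduce(lambda x, y: x ^ y, v)
--
-- def mult_M(A, B):
--     kA, nA, okA = check_matrix(A)
--     kB, nB, okB = check_matrix(B)
--     assert(nA == kB)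
--     assert(okA)
--     assert(okB)
--     result = [[0] * nB for _ in range(kA)]
--     Bt = transpose(B)
--     for r in range(kA):
--         for c in range(nB):
--             result[r][c] = xor1( map(operator.mul, A[r], Bt[c]) )
--     return result
--
-- def transpose(X):
--     return list(map(list, zip(*X)))
-- ===== SOURCE B (Python) =====
-- def mult_M(A, B):
--     assert A and B
--     assert all(len(rowA) == len(B) for rowA in A)
--     assert all(len(rowB) == len(B[0]) for rowB in B)
--     result = []
--     for rowA in A:
--         acc = [0] * len(B[0])
--         for a, rowB in zip(rowA, B):
--             acc = [x ^ a * y for x, y in zip(acc, rowB)]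
--         result.append(acc)
--     return result
-- ===== Notes on version B (the rewrite author's own statement) =====
-- stated objective: simpler
-- what changed: Drops the transpose table, the index-filled result matrix and the reduce-based dot products: B streams each row of A against the rows of B via zip, xor-accumulating the scaled rows of B into a running accumulator row.
import Mathlib
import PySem

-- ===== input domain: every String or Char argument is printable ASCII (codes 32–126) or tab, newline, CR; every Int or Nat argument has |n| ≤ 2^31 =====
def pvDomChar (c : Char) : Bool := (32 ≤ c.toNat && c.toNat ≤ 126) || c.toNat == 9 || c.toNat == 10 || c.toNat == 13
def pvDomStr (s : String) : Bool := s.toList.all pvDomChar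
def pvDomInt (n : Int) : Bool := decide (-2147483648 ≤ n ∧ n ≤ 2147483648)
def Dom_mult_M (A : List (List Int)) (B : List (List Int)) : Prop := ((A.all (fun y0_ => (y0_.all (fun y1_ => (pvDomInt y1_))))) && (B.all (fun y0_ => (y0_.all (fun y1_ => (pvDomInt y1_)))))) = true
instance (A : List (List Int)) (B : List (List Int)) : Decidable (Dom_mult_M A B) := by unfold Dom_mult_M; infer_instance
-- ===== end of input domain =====

-- B drops the transpose table and the reduce-based dot products: it streams each row of A
-- against the rows of B, xor-accumulating scaled rows directly (same O(k·m·n) cost, simpler).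

-- ===== PORT A =====
-- check_matrix(M): rows, cols = total//rows, ok = every row has length cols
def pvCheckMatrix (M : List (List Int)) : Int × Int × Bool :=
  let rows : Int := M.length
  let nn : Int := (M.foldl (fun acc r => acc ++ r) ([] : List Int)).length
  let cols : Int := PySem.Int.floordiv nn rows
  let ok : Bool := (PySem.List.pyRange 0 rows 1).foldl
    (fun ok r => ok && (((PySem.List.pyGetD M r []).length : Int) == cols)) true
  (rows, cols, ok)

-- xor1(v) = reduce(lambda x, y: x ^ y, v); Python raises TypeError on [], which Pre_ rules out
def pvXor1 (v : List Int) : Int :=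
  match v with
  | [] => 0
  | h :: t => t.foldl PySem.Int.bxor h

-- transpose(X) = list(map(list, zip(*X))): columns until the shortest row runs out
def pvTranspose (X : List (List Int)) : List (List Int) :=
  if h : (X.isEmpty || X.any (·.isEmpty)) then []
  else (X.map (fun r => r.headD 0)) :: pvTranspose (X.map (fun r => r.tail))
termination_by (X.headD []).length
decreasing_by
  cases X with
  | nil => simp at h
  | cons x xs =>
    simp only [List.isEmpty_cons, List.any_cons, Bool.false_or, Bool.or_eq_true, not_or] at h
    cases x with
    | nil => simp at h
    | cons y ys => simp

-- the asserts (rows > 0, nA == kB, okA, okB) raise exactly outside Pre_mult_M and are dropped here;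
-- the fill loops write result[r][c] exactly once each, rendered as index maps over the same ranges
def mult_M (A : List (List Int)) (B : List (List Int)) : List (List Int) :=
  let cA := pvCheckMatrix A
  let kA := cA.1
  let cB := pvCheckMatrix B
  let nB := cB.2.1
  let Bt := pvTranspose B
  (PySem.List.pyRange 0 kA 1).map (fun r =>
    (PySem.List.pyRange 0 nB 1).map (fun c =>
      pvXor1 (List.zipWith (· * ·) (PySem.List.pyGetD A r []) (PySem.List.pyGetD Bt c []))))

-- ===== PORT B =====
-- B's validation asserts raise exactly outside Pre_mult_M and are dropped here, like A's
def mult_M_alt (A : List (List Int)) (B : List (List Int)) : List (List Int) :=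
  A.map (fun rowA =>
    (rowA.zip B).foldl
      (fun acc p => List.zipWith (fun x y => PySem.Int.bxor x (p.1 * y)) acc p.2)
      (List.replicate (B.headD []).length 0))

-- ===== PRECONDITION & SPEC =====
-- Pre_ excludes exactly the inputs where A raises: an empty matrix (assert rows > 0), ragged rows
-- (assert okA/okB), or inner-dimension mismatch (assert nA == kB).
def Pre_mult_M (A : List (List Int)) (B : List (List Int)) : Prop :=
  A ≠ [] ∧ B ≠ [] ∧ (∀ r ∈ A, r.length = B.length) ∧
    (∀ r ∈ B, r.length = (B.headD []).length)
instance (A : List (List Int)) (B : List (List Int)) : Decidable (Pre_mult_M A B) := by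
  unfold Pre_mult_M; infer_instance

def pvWitness_mult_M : List (List Int) × List (List Int) := ([[1, 0], [1, 1]], [[1, 1], [0, 1]])

def Spec_mult_M (A : List (List Int)) (B : List (List Int)) (out : List (List Int)) : Prop := out = mult_M_alt A B
instance (A : List (List Int)) (B : List (List Int)) (out : List (List Int)) : Decidable (Spec_mult_M A B out) := by unfold Spec_mult_M; infer_instance

-- ===== CLAIM (what is proved, stated in full; the proofs are below) =====
def Claim_equal_mult_M : Prop := ∀ (A : List (List Int)) (B : List (List Int)), Dom_mult_M A B → Pre_mult_M A B → Spec_mult_M A B (mult_M A B)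

-- ===== LEMMAS AND PROOFS =====

lemma pvFoldl_append (init : List Int) (B : List (List Int)) :
    B.foldl (fun acc r => acc ++ r) init = init ++ B.flatten := by
  induction B generalizing init <;> simp_all

lemma pvCheckMatrix_cols (n : Nat) (B : List (List Int)) (hB : B ≠ [])
    (hU : ∀ r ∈ B, r.length = n) : (pvCheckMatrix B).2.1 = (n : Int) := by
  simp only [pvCheckMatrix, pvFoldl_append, List.nil_append]
  have hrep : B.map List.length = List.replicate B.length n := by
    rw [List.map_eq_replicate_iff]; intro r hr; exact hU r hr
  have hlen : B.flatten.length = B.length * n := by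
    rw [List.length_flatten, hrep, List.sum_replicate, smul_eq_mul]
  rw [hlen]
  rw [PySem.Int.floordiv_natCast]
  have hpos : 0 < B.length := List.length_pos_iff.mpr hB
  rw [Nat.mul_div_cancel_left n hpos]

lemma pvTranspose_uniform (n : Nat) (B : List (List Int)) (hB : B ≠ [])
    (hU : ∀ r ∈ B, r.length = n) :
    pvTranspose B = (List.range n).map (fun c => B.map (fun row => row.getD c 0)) := by
  induction n generalizing B with
  | zero =>
    cases B with
    | nil => exact absurd rfl hB
    | cons x xs =>
      have hx : x = [] := List.eq_nil_of_length_eq_zero (hU x List.mem_cons_self)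
      rw [pvTranspose]; simp [hx]
  | succ n ih =>
    have hcond : (B.isEmpty || B.any (·.isEmpty)) = false := by
      cases B with
      | nil => exact absurd rfl hB
      | cons x xs =>
        simp only [List.isEmpty_cons, List.any_eq_false, Bool.false_or]
        intro r hr
        have := hU r hr
        cases r with
        | nil => simp at this
        | cons y ys => simp
    rw [pvTranspose, dif_neg (by simp [hcond])]
    have hne : B.map (fun r => r.tail) ≠ [] := by
      cases B with
      | nil => exact absurd rfl hB
      | cons x xs => simp
    have hU' : ∀ r ∈ B.map (fun r => r.tail), r.length = n := by
      intro r hr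
      obtain ⟨s, hs, rfl⟩ := List.mem_map.mp hr
      have := hU s hs
      cases s with
      | nil => simp at this
      | cons y ys => simpa using this
    rw [ih (B.map (fun r => r.tail)) hne hU']
    rw [List.range_succ_eq_map, List.map_cons]
    refine List.cons_eq_cons.mpr ⟨?_, ?_⟩
    · apply List.map_congr_left
      intro r hr
      have := hU r hr
      cases r with
      | nil => simp at this
      | cons y ys => rfl
    · rw [List.map_map]
      apply List.map_congr_left
      intro c _
      rw [List.map_map]
      apply List.map_congr_left
      intro r hr
      have := hU r hr
      cases r with
      | nil => simp at this
      | cons y ys => rfl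

lemma pvAltRow_spec (n : Nat) (rowA : List Int) (B : List (List Int)) (acc : List Int)
    (hU : ∀ r ∈ B, r.length = n) (hacc : acc.length = n) :
    ((rowA.zip B).foldl (fun acc p => List.zipWith (fun x y => PySem.Int.bxor x (p.1 * y)) acc p.2) acc).length = n
    ∧ ∀ c, c < n →
      ((rowA.zip B).foldl (fun acc p => List.zipWith (fun x y => PySem.Int.bxor x (p.1 * y)) acc p.2) acc).getD c 0
      = (rowA.zip B).foldl (fun s p => PySem.Int.bxor s (p.1 * p.2.getD c 0)) (acc.getD c 0) := by
  induction rowA generalizing B acc with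
  | nil => simp [hacc]
  | cons a as ih =>
    cases B with
    | nil => simp [hacc]
    | cons rb bs =>
      have hrb : rb.length = n := hU rb List.mem_cons_self
      have hU' : ∀ r ∈ bs, r.length = n := fun r hr => hU r (List.mem_cons_of_mem _ hr)
      have hstep : (List.zipWith (fun x y => PySem.Int.bxor x (a * y)) acc rb).length = n := by
        simp [List.length_zipWith, hacc, hrb]
      obtain ⟨hl, hg⟩ := ih bs (List.zipWith (fun x y => PySem.Int.bxor x (a * y)) acc rb) hU' hstep
      refine ⟨by simpa using hl, ?_⟩
      intro c hc
      simp only [List.zip_cons_cons, List.foldl_cons]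
      rw [hg c hc]
      congr 1
      simp [List.getD_eq_getElem?_getD, hacc.symm ▸ hc, hrb.symm ▸ hc]

lemma pvXor1_foldl (l : List Int) (hl : l ≠ []) :
    pvXor1 l = l.foldl PySem.Int.bxor 0 := by
  cases l with
  | nil => exact absurd rfl hl
  | cons h t =>
    have : PySem.Int.bxor 0 h = h := by rw [PySem.Int.bxor_comm]; simp
    simp [pvXor1, this]

lemma pvZipWith_eq_map_zip (f : Int → List Int → Int) (l : List Int) (l' : List (List Int)) :
    List.zipWith f l l' = (l.zip l').map (fun p => f p.1 p.2) := by
  simp [List.zip, List.map_zipWith]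

lemma pvEntry_eq (c : Nat) (a : Int) (as : List Int) (rb : List Int) (bs : List (List Int)) :
    pvXor1 (List.zipWith (· * ·) (a :: as) ((rb :: bs).map (fun row => row.getD c 0)))
    = ((a :: as).zip (rb :: bs)).foldl (fun s p => PySem.Int.bxor s (p.1 * p.2.getD c 0)) 0 := by
  rw [List.zipWith_map_right]
  rw [pvZipWith_eq_map_zip (fun a rb => a * rb.getD c 0)]
  rw [pvXor1_foldl _ (by simp [List.zip_cons_cons])]
  rw [List.foldl_map]

-- ===== VERDICT (by name: the statement is the Claim_ definition above) =====
theorem mult_M_spec : Claim_equal_mult_M := by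
  intro A B _ hPre
  obtain ⟨hA, hB, hAr, hBr⟩ := hPre
  unfold Spec_mult_M
  simp only [mult_M, mult_M_alt]
  have hkA : (pvCheckMatrix A).1 = (A.length : Int) := rfl
  have hnB : (pvCheckMatrix B).2.1 = ((B.headD []).length : Int) :=
    pvCheckMatrix_cols _ B hB hBr
  rw [hkA, hnB, pvTranspose_uniform (B.headD []).length B hB hBr,
    PySem.List.pyRange_zero_natCast, PySem.List.pyRange_zero_natCast, List.map_map]
  set n := (B.headD []).length with hn
  apply List.ext_getElem (by simp)
  intro r hr1 hr2
  simp only [List.getElem_map, List.getElem_range, Function.comp_apply,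
    PySem.List.pyGetD_natCast]
  simp only [List.length_map, List.length_range] at hr1
  have hrowmem : A[r] ∈ A := List.getElem_mem _
  have hrowlen : (A[r]).length = B.length := hAr _ hrowmem
  have hgetA : A.getD r [] = A[r] := List.getD_eq_getElem A [] hr1
  rw [hgetA]
  obtain ⟨hl, hg⟩ := pvAltRow_spec n (A[r]) B (List.replicate n 0) hBr (by simp)
  apply List.ext_getElem (by simpa using hl.symm)
  intro c hc1 hc2
  simp only [List.length_map, List.length_range] at hc1
  have hBt : ((List.range n).map (fun c => B.map (fun row => row.getD c 0))).getD c []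
      = B.map (fun row => row.getD c 0) := by
    rw [List.getD_eq_getElem _ _ (by simpa using hc1)]
    simp
  simp only [List.getElem_map, List.getElem_range, PySem.List.pyGetD_natCast, hBt]
  rw [← List.getD_eq_getElem _ 0 hc2, hg c hc1]
  have hz : (List.replicate n (0 : Int)).getD c 0 = 0 := by
    rw [List.getD_eq_getElem _ _ (by simpa using hc1)]; simp
  rw [hz]
  cases hAe : A[r] with
  | nil => rw [hAe] at hrowlen; exact absurd hrowlen.symm (by simpa using hB)
  | cons a as =>
    cases B with
    | nil => exact absurd rfl hB
    | cons rb bs => exact pvEntry_eq c a as rb bs
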